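-- pv_equiv track=rewrite | github.com/DominikEndrych/Parallel-Algorithms | SRFLP/SRFLP.py | PrefixPermutations
-- ===== SOURCE A (Python) =====
-- import itertools as it
--
-- def PrefixPermutations(n, s):
--     numbers_to_permutate = [*range(n)]
--     numbers_to_permutate.remove(s)
--     permutations = []
--     for permutation in it.permutations(numbers_to_permutate):
--         p = list(permutation)
--         p.insert(0, s)
--         permutations.append(p)
--
--     return permutations
-- ===== SOURCE B (Python) =====
-- def PrefixPermutations(n, s):
--     # Recursive backtracking generator instead of itertools.permutations:
--     # same lexicographic order, same results; a different decomposition.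
--     remaining = list(range(n))
--     remaining.remove(s)
--     results = []
--
--     def backtrack(prefix, remaining):
--         if not remaining:
--             results.append(prefix)
--             return
--         for i in range(len(remaining)):
--             backtrack(prefix + [remaining[i]],
--                       remaining[:i] + remaining[i + 1:])
--
--     backtrack([s], remaining)
--     return results
-- ===== Notes on version B (the rewrite author's own statement) =====
-- stated objective: alternative
-- what changed: Replaces the itertools.permutations call with an explicit recursive backtracking generator that threads a prefix (seeded with s) and a remaining-elements list, collecting completed prefixes; no itertools, no per-permutation list(...)/insert.
import Mathlib
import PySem

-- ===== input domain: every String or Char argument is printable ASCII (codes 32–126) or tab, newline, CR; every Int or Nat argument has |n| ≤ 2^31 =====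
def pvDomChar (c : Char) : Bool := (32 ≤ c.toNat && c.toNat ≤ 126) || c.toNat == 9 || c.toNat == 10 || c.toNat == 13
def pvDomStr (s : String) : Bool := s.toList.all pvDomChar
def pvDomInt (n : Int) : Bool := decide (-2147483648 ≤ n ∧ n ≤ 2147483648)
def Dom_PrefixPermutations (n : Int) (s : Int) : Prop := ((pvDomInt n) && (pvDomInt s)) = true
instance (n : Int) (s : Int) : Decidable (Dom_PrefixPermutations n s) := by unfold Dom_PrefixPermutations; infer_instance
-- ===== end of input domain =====

-- B replaces the itertools.permutations call with an explicit recursive backtracking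
-- generator (prefix + remaining list); an alternative decomposition, same results.

-- ===== PORT A =====
-- it.permutations(xs) is PySem.List.permutations xs xs.length (lexicographic index order, exact).
def PrefixPermutations (n : Int) (s : Int) : List (List Int) :=
  let numbers_to_permutate := PySem.List.pyRange 0 n
  match PySem.List.remove? numbers_to_permutate s with
  | none => []  -- Python raises ValueError here; excluded by Pre_
  | some nums =>
    (PySem.List.permutations nums nums.length).foldl
      (fun permutations p => permutations ++ [s :: p]) []

-- ===== PORT B =====
-- backtrack(prefix, remaining); fuel = remaining.length makes the recursion structural.
def pvBacktrack : Nat → List Int → List Int → List (List Int) → List (List Int)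
  | _, pre, [], acc => acc ++ [pre]
  | 0, _, _ :: _, acc => acc  -- fuel exhausted: unreachable when fuel = remaining.length
  | f+1, pre, x :: xs, acc =>
    (PySem.List.pyRange 0 (PySem.List.len (x :: xs))).foldl
      (fun a i =>
        pvBacktrack f (pre ++ [PySem.List.pyGetD (x :: xs) i 0])
          (PySem.List.slice (x :: xs) none (some i) ++ PySem.List.slice (x :: xs) (some (i+1)) none) a)
      acc

def PrefixPermutations_alt (n : Int) (s : Int) : List (List Int) :=
  match PySem.List.remove? (PySem.List.pyRange 0 n) s with
  | none => []  -- Python raises ValueError here; excluded by Pre_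
  | some remaining => pvBacktrack remaining.length [s] remaining []

-- ===== PRECONDITION & SPEC =====
-- A raises ValueError (list.remove) exactly when s is not in range(n); Pre_ admits the rest.
def Pre_PrefixPermutations (n : Int) (s : Int) : Prop := 0 ≤ s ∧ s < n
instance (n : Int) (s : Int) : Decidable (Pre_PrefixPermutations n s) := by
  unfold Pre_PrefixPermutations; infer_instance
def pvWitness_PrefixPermutations : Int × Int := (3, 1)

def Spec_PrefixPermutations (n : Int) (s : Int) (out : List (List Int)) : Prop := out = PrefixPermutations_alt n s
instance (n : Int) (s : Int) (out : List (List Int)) : Decidable (Spec_PrefixPermutations n s out) := by unfold Spec_PrefixPermutations; infer_instance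

-- ===== CLAIM (what is proved, stated in full; the proofs are below) =====
def Claim_equal_PrefixPermutations : Prop := ∀ (n : Int) (s : Int), Dom_PrefixPermutations n s → Pre_PrefixPermutations n s → Spec_PrefixPermutations n s (PrefixPermutations n s)

-- ===== LEMMAS AND PROOFS =====

-- unfolding equation for PySem.List.permutations at a successor rank
lemma permutations_succ (xs : List Int) (r : Nat) :
    PySem.List.permutations xs (r+1) =
      (List.range xs.length).flatMap
        (fun i => match xs[i]? with
          | none => []
          | some x => (PySem.List.permutations (xs.eraseIdx i) r).map (fun p => x :: p)) := by
  conv_lhs => rw [PySem.List.permutations]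
  congr 1
  funext i
  cases hx : xs[i]? <;> simp

-- the backtracking fold over any in-range index list equals the flatMap of A's generator
lemma bt_eq : ∀ (fuel : Nat) (rem : List Int), rem.length = fuel → ∀ (pre : List Int) (acc : List (List Int)),
    pvBacktrack fuel pre rem acc = acc ++ (PySem.List.permutations rem fuel).map (fun p => pre ++ p) := by
  intro fuel
  induction fuel with
  | zero =>
    intro rem hlen pre acc
    have : rem = [] := List.length_eq_zero_iff.mp hlen
    subst this
    simp [pvBacktrack, PySem.List.permutations]
  | succ f ih =>
    intro rem hlen pre acc
    match rem, hlen with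
    | x :: xs, hlen =>
      have hlen' : (x :: xs).length = f + 1 := hlen
      show (PySem.List.pyRange 0 (PySem.List.len (x :: xs))).foldl _ acc = _
      rw [permutations_succ]
      have hrange : PySem.List.pyRange 0 (PySem.List.len (x :: xs)) =
          List.map (fun k : Nat => (k : Int)) (List.range (x :: xs).length) := by
        rw [PySem.List.len_eq]; exact PySem.List.pyRange_zero_natCast _
      -- generalize over the index list
      have main : ∀ (l : List Nat), (∀ k ∈ l, k < (x :: xs).length) → ∀ (acc : List (List Int)),
          (List.map (fun k : Nat => (k : Int)) l).foldl
            (fun a i =>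
              pvBacktrack f (pre ++ [PySem.List.pyGetD (x :: xs) i 0])
                (PySem.List.slice (x :: xs) none (some i) ++
                 PySem.List.slice (x :: xs) (some (i+1)) none) a) acc
            = acc ++ (l.flatMap
                (fun i => match (x :: xs)[i]? with
                  | none => []
                  | some y => (PySem.List.permutations ((x :: xs).eraseIdx i) f).map (fun p => y :: p))).map
                (fun p => pre ++ p) := by
        intro l
        induction l with
        | nil => intro _ acc; simp
        | cons k l' ihl =>
          intro hb acc
          have hk : k < (x :: xs).length := hb k (List.mem_cons_self)
          have hget : PySem.List.pyGetD (x :: xs) (k : Int) 0 = (x :: xs)[k] := by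
            rw [PySem.List.pyGetD_natCast]
            exact List.getD_eq_getElem _ _ hk
          have hslice : PySem.List.slice (x :: xs) none (some (k : Int)) ++
              PySem.List.slice (x :: xs) (some ((k : Int)+1)) none = (x :: xs).eraseIdx k := by
            rw [PySem.List.slice_to _ (by positivity)]
            have h1 : ((k : Int) + 1) = ((k + 1 : Nat) : Int) := by push_cast; ring
            rw [h1, PySem.List.slice_from _ (by positivity)]
            simp [List.eraseIdx_eq_take_drop_succ]
          have herase : ((x :: xs).eraseIdx k).length = f := by
            rw [List.length_eraseIdx, if_pos hk, hlen']; omega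
          simp only [List.map_cons, List.foldl_cons, hget, hslice]
          rw [ih _ herase]
          rw [ihl (fun j hj => hb j (List.mem_cons_of_mem _ hj))]
          have hidx : (x :: xs)[k]? = some (x :: xs)[k] := List.getElem?_eq_getElem hk
          simp only [List.flatMap_cons, hidx, List.map_append, List.map_map, List.append_assoc]
          simp [Function.comp]
      rw [hrange, main _ (fun k hk => List.mem_range.mp hk) acc]

-- under Pre_, A's remove produces exactly B's filtered list
lemma remove_eq_filter (n s : Int) (h : Pre_PrefixPermutations n s) :
    PySem.List.remove? (PySem.List.pyRange 0 n) s =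
      some ((PySem.List.pyRange 0 n).filter (fun x => x != s)) := by
  obtain ⟨h0, h1⟩ := h
  have hmem : s ∈ PySem.List.pyRange 0 n := PySem.List.mem_pyRange_one.mpr ⟨h0, h1⟩
  have hnodup : (PySem.List.pyRange 0 n).Nodup := by
    have hn : 0 ≤ n := le_of_lt (lt_of_le_of_lt h0 h1)
    obtain ⟨m, hm⟩ := Int.eq_ofNat_of_zero_le hn
    rw [hm, PySem.List.pyRange_zero_natCast]
    exact (List.nodup_range).map (fun a b hab => by exact_mod_cast hab)
  set l := PySem.List.pyRange 0 n with hl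
  unfold PySem.List.remove?
  cases hix : List.idxOf? s l with
  | none => exact absurd (List.idxOf?_eq_none_iff.mp hix) (by simpa using hmem)
  | some i =>
    obtain ⟨hi, hgi, -⟩ := List.idxOf?_eq_some_iff.mp hix
    have hio : List.idxOf s l < l.length := List.idxOf_lt_length_of_mem hmem
    have hga : l[List.idxOf s l] = s := List.getElem_idxOf hio
    have hieq : i = List.idxOf s l := by
      exact (List.Nodup.getElem_inj_iff hnodup).mp (hgi.trans hga.symm)
    simp only [Option.map_some, Option.some.injEq, hieq]
    rw [List.eraseIdx_idxOf_eq_erase]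
    exact hnodup.erase_eq_filter s

-- ===== VERDICT (by name: the statement is the Claim_ definition above) =====
theorem PrefixPermutations_spec : Claim_equal_PrefixPermutations := by
  intro n s _ hpre
  unfold Spec_PrefixPermutations PrefixPermutations PrefixPermutations_alt
  simp only [remove_eq_filter n s hpre]
  rw [PySem.List.foldl_append_singleton_eq_map]
  rw [bt_eq _ _ rfl]
  simp
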